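-- pv_equiv track=rewrite | github.com/elviorodriguez/MultimerMapper | backups/stability.py | combination_label
-- ===== SOURCE A (Python) =====
-- from collections import defaultdict, Counter
-- from collections import Counter
--
-- def combination_label(names, short_label = True):
--     """Creates a shorter label by grouping repeated names."""
--
--     if short_label:
--         seen = set()
--         count = Counter(names)  # Count occurrences
--         new_label = []
--
--         for name in names:
--             if name not in seen:
--                 seen.add(name)
--                 if count[name] > 1:
--                     new_label.append(f"{count[name]} x ({name})")
--                 else:
--                     new_label.append(name)
--
--         return ", ".join(new_label)
--
--     else:
--         return ', '.join(names) if isinstance(names, tuple) else str(names)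
-- ===== SOURCE B (Python) =====
-- def combination_label(names, short_label = True):
--     """Creates a shorter label by grouping repeated names."""
--     if short_label:
--         rest = list(names)
--         parts = []
--         while rest:
--             name = rest[0]
--             c = rest.count(name)
--             parts.append(f"{c} x ({name})" if c > 1 else name)
--             rest = [x for x in rest if x != name]
--         return ", ".join(parts)
--     else:
--         return ', '.join(names) if isinstance(names, tuple) else str(names)
-- ===== Notes on version B (the rewrite author's own statement) =====
-- stated objective: alternative
-- what changed: B uses no Counter, no seen set and no dict at all: it repeatedly peels off the first remaining name, counts it in the remaining suffix and then deletes all of its occurrences, so uniqueness and counts both fall out of the shrinking worklist.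
import Mathlib
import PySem

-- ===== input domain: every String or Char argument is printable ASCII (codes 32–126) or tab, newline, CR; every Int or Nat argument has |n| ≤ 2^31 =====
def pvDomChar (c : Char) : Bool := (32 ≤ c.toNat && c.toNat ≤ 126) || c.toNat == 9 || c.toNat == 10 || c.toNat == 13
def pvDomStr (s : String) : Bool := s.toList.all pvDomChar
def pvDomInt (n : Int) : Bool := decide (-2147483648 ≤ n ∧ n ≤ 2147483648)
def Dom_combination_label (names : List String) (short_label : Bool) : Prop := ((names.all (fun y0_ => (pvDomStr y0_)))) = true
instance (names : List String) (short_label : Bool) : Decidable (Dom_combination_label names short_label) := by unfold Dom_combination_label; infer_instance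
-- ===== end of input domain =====

-- B drops A's Counter and seen-set filtering pass entirely: it peels off the first
-- remaining name, counts it in the shrinking worklist and deletes all its occurrences;
-- objective: alternative (same result, no auxiliary count/seen structures).
-- (The short_label=False branch returns str(names), Python's list repr; each port carries
-- its own hand-written transliteration of it, exact on the stated ASCII (plus tab/LF/CR) domain.)

-- ===== PORT A =====
-- hand port of Python repr(s) for a str whose chars are printable ASCII or tab/LF/CR (the Dom):
-- quote is ' unless the string contains ' and no "; backslash, the quote, tab, LF, CR are escaped.
def pyReprStr (s : String) : String :=
  let cs := s.toList
  let q : Char := if cs.contains '\'' && !(cs.contains '"') then '"' else '\''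
  String.ofList (q :: (cs.flatMap (fun c =>
    if c = '\\' then ['\\', '\\']
    else if c = q then ['\\', q]
    else if c = '\t' then ['\\', 't']
    else if c = '\n' then ['\\', 'n']
    else if c = '\r' then ['\\', 'r']
    else [c])) ++ [q])

-- hand port of Python str(list_of_str): '[' + ', '-joined reprs + ']' (exact on Dom strings)
def pyStrOfList (names : List String) : String :=
  String.ofList ('[' :: (PySem.Str.join ", " (names.map pyReprStr)).toList ++ [']'])

def combination_label (names : List String) (short_label : Bool) : String :=
  if short_label then
    let count : PySem.Dict String Int := PySem.Dict.counter names
    let r := names.foldl (fun (st : PySem.Set String × List String) name =>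
      if PySem.Set.contains st.1 name then st
      else (PySem.Set.add st.1 name,
            st.2 ++ [if count.getD name 0 > 1
                     then PySem.Int.toStr (count.getD name 0) ++ " x (" ++ name ++ ")"
                     else name]))
      (PySem.Set.empty, [])
    PySem.Str.join ", " r.2
  else
    -- names : List String is never a Python tuple, so str(names) is taken
    pyStrOfList names

-- ===== PORT B =====
-- B-side hand port of Python repr(s) (same Python construct as A's branch, ported for B)
def altReprStr (s : String) : String :=
  let cs := s.toList
  let q : Char := if cs.contains '\'' && !(cs.contains '"') then '"' else '\''
  String.ofList (q :: (cs.flatMap (fun c =>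
    if c = '\\' then ['\\', '\\']
    else if c = q then ['\\', q]
    else if c = '\t' then ['\\', 't']
    else if c = '\n' then ['\\', 'n']
    else if c = '\r' then ['\\', 'r']
    else [c])) ++ [q])

-- B-side hand port of Python str(list_of_str)
def altStrOfList (names : List String) : String :=
  String.ofList ('[' :: (PySem.Str.join ", " (names.map altReprStr)).toList ++ [']'])

-- the while loop of Source B: pop the first remaining name, count it, drop all its occurrences
def altParts : List String → List String
  | [] => []
  | name :: rest =>
    let c : Int := ((name :: rest).count name : Int)
    (if c > 1 then PySem.Int.toStr c ++ " x (" ++ name ++ ")" else name)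
      :: altParts ((name :: rest).filter (fun x => x != name))
termination_by xs => xs.length
decreasing_by
  simp only [List.filter_cons, bne_self_eq_false, List.length_cons]
  exact Nat.lt_succ_of_le (List.length_filter_le _ _)

def combination_label_alt (names : List String) (short_label : Bool) : String :=
  if short_label then PySem.Str.join ", " (altParts names)
  else altStrOfList names

-- ===== PRECONDITION & SPEC =====
def Spec_combination_label (names : List String) (short_label : Bool) (out : String) : Prop := out = combination_label_alt names short_label
instance (names : List String) (short_label : Bool) (out : String) : Decidable (Spec_combination_label names short_label out) := by unfold Spec_combination_label; infer_instance

-- ===== CLAIM (what is proved, stated in full; the proofs are below) =====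
def Claim_equal_combination_label : Prop := ∀ (names : List String) (short_label : Bool), Dom_combination_label names short_label → Spec_combination_label names short_label (combination_label names short_label)

-- ===== LEMMAS AND PROOFS =====

-- A's seen-set loop produces, past accumulator a, the labels of the not-yet-seen names in
-- first-occurrence order (PySem.List.dedup filtered by the current seen set).
theorem loopA_eq (f : String → String) (xs : List String)
    (s : PySem.Set String) (a : List String) :
    (xs.foldl (fun (st : PySem.Set String × List String) name =>
        if PySem.Set.contains st.1 name then st
        else (PySem.Set.add st.1 name, st.2 ++ [f name])) (s, a)).2
      = a ++ ((PySem.List.dedup xs).filter (fun n => !PySem.Set.contains s n)).map f := by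
  induction xs generalizing s a with
  | nil => simp
  | cons x xs ih =>
    simp only [List.foldl_cons]
    by_cases hx : x ∈ s
    · rw [if_pos (by simpa [PySem.Set.contains_iff] using hx)]
      rw [ih s a]
      simp only [PySem.List.dedup_eq_ofList, PySem.Set.ofList_cons]
      rw [List.filter_cons_of_neg (by simpa [PySem.Set.contains_iff] using hx)]
      congr 2
      · simp only [PySem.Set.discard]
        rw [List.filter_filter]
        apply List.filter_congr
        intro n _
        by_cases hnx : n = x
        · subst hnx; simp [hx]
        · simp [hnx]
    · rw [if_neg (by simpa [PySem.Set.contains_iff] using hx)]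
      rw [ih (PySem.Set.add s x) (a ++ [f x])]
      simp only [PySem.List.dedup_eq_ofList, PySem.Set.ofList_cons]
      rw [List.filter_cons_of_pos (by simpa [PySem.Set.contains_iff] using hx)]
      simp only [List.map_cons, List.append_assoc, List.singleton_append]
      congr 3
      simp only [PySem.Set.discard]
      rw [List.filter_filter]
      apply List.filter_congr
      intro n _
      by_cases hnx : n = x
      · subst hnx; simp
      · simp [hnx]

-- dedup commutes with filtering away one value (both keep first occurrences in order)
theorem ofList_filter_ne (x : String) (xs : List String) :
    PySem.Set.ofList (xs.filter (fun y => y != x))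
      = List.filter (fun y => !(y == x)) (PySem.Set.ofList xs) := by
  induction xs with
  | nil => rfl
  | cons a xs ih =>
    by_cases hax : a = x
    · subst hax
      rw [List.filter_cons_of_neg (by simp), PySem.Set.ofList_cons,
          List.filter_cons_of_neg (by simp), ih]
      simp only [PySem.Set.discard]
      rw [List.filter_filter]
      apply List.filter_congr
      intro n _; simp
    · rw [List.filter_cons_of_pos (by simp [hax]), PySem.Set.ofList_cons,
          PySem.Set.ofList_cons, List.filter_cons_of_pos (by simp [hax]), ih]
      simp only [PySem.Set.discard]
      rw [List.filter_filter, List.filter_filter]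
      congr 1
      exact List.filter_congr (fun n _ => Bool.and_comm _ _)

-- dedup of a cons: head, then dedup of the tail with all copies of the head removed
theorem dedup_cons_filter (x : String) (xs : List String) :
    PySem.List.dedup (x :: xs) = x :: PySem.List.dedup (xs.filter (fun y => y != x)) := by
  simp only [PySem.List.dedup_eq_ofList, PySem.Set.ofList_cons, ofList_filter_ne]
  rfl

-- B's worklist loop computes exactly the labels of dedup xs, with counts taken in xs
theorem altParts_eq (xs : List String) :
    altParts xs = (PySem.List.dedup xs).map (fun n =>
      if ((xs.count n : Int)) > 1
      then PySem.Int.toStr (xs.count n) ++ " x (" ++ n ++ ")" else n) := by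
  induction xs using altParts.induct with
  | case1 => simp [altParts]
  | case2 name rest ih =>
    rw [altParts, dedup_cons_filter, List.map_cons]
    congr 1
    rw [List.filter_cons_of_neg (by simp)] at ih ⊢
    rw [ih]
    apply List.map_congr_left
    intro n hn
    have hne : n ≠ name := by
      have := (PySem.List.mem_dedup _ _).mp hn
      have := List.of_mem_filter this
      simpa using this
    have hcount : (rest.filter (fun x => x != name)).count n = (name :: rest).count n := by
      rw [List.count_filter (by simp [hne])]
      simp [Ne.symm hne]
    rw [hcount]

-- ===== VERDICT (by name: the statement is the Claim_ definition above) =====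
theorem combination_label_spec : Claim_equal_combination_label := by
  intro names short_label _
  unfold Spec_combination_label combination_label combination_label_alt
  cases short_label with
  | false => rfl
  | true =>
    simp only [reduceIte]
    rw [loopA_eq, altParts_eq]
    simp [PySem.Dict.getD_counter, PySem.Set.empty, PySem.Set.contains]
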